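-- pv_equiv track=rewrite | github.com/mkettune/ngpt | reconstruct/util.py | digit_reversed_range
-- ===== SOURCE A (Python) =====
-- def digit_reversed_range(maximum, base):
-- 	'''Return a list of integers from 0 to maximum-1 ordered in reverse digit order.'''
--
-- 	def next_pow_k(i, k):
-- 		'''Returns the smallest power of k that is greater than i.'''
-- 		n = 1
-- 		while n <= i:
-- 			n *= k
-- 		return n
--
-- 	next_pow = next_pow_k(maximum - 1, base)
-- 	result = []
--
-- 	for i in range(next_pow):
-- 		it = base
-- 		reverse_it = next_pow // base
-- 		j = 0
-- 		n = i
-- 		while reverse_it > 0: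
-- 			j += (n % it) * reverse_it
-- 			n //= base
-- 			reverse_it //= base
--
-- 		if j < maximum:
-- 			result.append(j)
--
-- 	return result
-- ===== SOURCE B (Python) =====
-- def digit_reversed_range(maximum, base):
-- 	'''Return a list of integers from 0 to maximum-1 ordered in reverse digit order.'''
-- 	n = 1
-- 	while n <= maximum - 1:
-- 		n *= base
-- 	seq = [0]
-- 	p = 1
-- 	while p < n:
-- 		seq = [base * x + t for t in range(base) for x in seq]
-- 		p *= base
-- 	return [j for j in seq if j < maximum]
-- ===== Notes on version B (the rewrite author's own statement) =====
-- stated objective: alternative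
-- what changed: Instead of recomputing the reversed-digit value of every index with an inner digit loop, B builds the whole reversed-digit sequence level by level (one list comprehension per digit position, seq -> [base*x+t for t in range(base) for x in seq]) and filters once at the end.
-- outside the precondition, e.g. on digit_reversed_range(5, -2): A returns [0, 0, 0, 0, 0, 0, 0, 0, 0, 0, 0, 0, 0, 0, 0, 0], B returns []
import Mathlib
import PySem

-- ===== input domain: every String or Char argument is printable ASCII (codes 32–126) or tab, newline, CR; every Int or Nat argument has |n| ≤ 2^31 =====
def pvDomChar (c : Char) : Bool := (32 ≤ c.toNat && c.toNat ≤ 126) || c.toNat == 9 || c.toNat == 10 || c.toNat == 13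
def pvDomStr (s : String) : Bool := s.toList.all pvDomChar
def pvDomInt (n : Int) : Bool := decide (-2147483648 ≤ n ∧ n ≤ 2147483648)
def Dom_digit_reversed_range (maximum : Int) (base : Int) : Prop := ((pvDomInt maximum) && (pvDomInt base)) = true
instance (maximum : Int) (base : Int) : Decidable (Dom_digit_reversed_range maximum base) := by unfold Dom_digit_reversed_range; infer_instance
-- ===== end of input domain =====

-- B builds the reversed-digit sequence level by level (one bulk pass per digit
-- position) instead of recomputing each index's reversed digits with an inner loop:
-- an alternative algorithm of the same asymptotic cost.


-- ===== PORT A =====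
-- `while n <= i: n *= k` of next_pow_k, with fuel (Python diverges for base 0/1; fuel never runs out on Pre_)
def pvNextPowA (fuel : Nat) (i k n : Int) : Int :=
  match fuel with
  | 0 => n
  | f + 1 => if n ≤ i then pvNextPowA f i k (n * k) else n

-- inner `while reverse_it > 0` loop: state (j, n, reverse_it); it = base throughout
def pvInnerA (fuel : Nat) (base it j n reverse_it : Int) : Int :=
  match fuel with
  | 0 => j
  | f + 1 =>
    if reverse_it > 0 then
      pvInnerA f base it (j + (PySem.Int.mod n it) * reverse_it)
        (PySem.Int.floordiv n base) (PySem.Int.floordiv reverse_it base)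
    else j

def digit_reversed_range (maximum : Int) (base : Int) : List Int :=
  let next_pow := pvNextPowA ((maximum - 1).toNat + 1) (maximum - 1) base 1
  (PySem.List.pyRange 0 next_pow 1).foldl
    (fun result i =>
      let j := pvInnerA (next_pow.toNat + 1) base base 0 i (PySem.Int.floordiv next_pow base)
      if j < maximum then result ++ [j] else result) []

-- ===== PORT B =====
-- `while n <= maximum - 1: n *= base`, with fuel (same Python loop shape as A's helper)
def pvNextPowB (fuel : Nat) (i k n : Int) : Int :=
  match fuel with
  | 0 => n
  | f + 1 => if n ≤ i then pvNextPowB f i k (n * k) else n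

-- `while p < n: seq = [base*x + t for t in range(base) for x in seq]; p *= base`
def pvBuildB (fuel : Nat) (base n : Int) (seq : List Int) (p : Int) : List Int :=
  match fuel with
  | 0 => seq
  | f + 1 =>
    if p < n then
      pvBuildB f base n
        ((PySem.List.pyRange 0 base 1).flatMap (fun t => seq.map (fun x => base * x + t)))
        (p * base)
    else seq

def digit_reversed_range_alt (maximum : Int) (base : Int) : List Int :=
  let n := pvNextPowB ((maximum - 1).toNat + 1) (maximum - 1) base 1
  (pvBuildB (n.toNat + 1) base n [0] 1).filter (fun j => decide (j < maximum))

-- ===== PRECONDITION & SPEC =====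
-- Pre_ covers the natural domain base ≥ 2 and also the degenerate inputs maximum ≤ 1 with
-- base ≤ -1 (there A still returns the digit-reversal value [0] / []). Excluded: base ≤ -2
-- with maximum ≥ 2, where A's digit loop never runs (reverse_it < 0) and it returns an
-- accidental all-zero list of length next_pow; and base ∈ {-1, 0, 1} with maximum ≥ 2 or
-- base ∈ {0, 1} with maximum ≤ 1, where A diverges or raises ZeroDivisionError.
def Pre_digit_reversed_range (maximum : Int) (base : Int) : Prop :=
  2 ≤ base ∨ (base ≤ -1 ∧ maximum ≤ 1)
instance (maximum : Int) (base : Int) : Decidable (Pre_digit_reversed_range maximum base) := by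
  unfold Pre_digit_reversed_range; infer_instance

def pvWitness_digit_reversed_range : Int × Int := (8, 2)

def Spec_digit_reversed_range (maximum : Int) (base : Int) (out : List Int) : Prop :=
  out = digit_reversed_range_alt maximum base
instance (maximum : Int) (base : Int) (out : List Int) : Decidable (Spec_digit_reversed_range maximum base out) := by
  unfold Spec_digit_reversed_range; infer_instance

-- ===== CLAIM (what is proved, stated in full; the proofs are below) =====
def Claim_equal_digit_reversed_range : Prop := ∀ (maximum : Int) (base : Int), Dom_digit_reversed_range maximum base → Pre_digit_reversed_range maximum base → Spec_digit_reversed_range maximum base (digit_reversed_range maximum base)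

-- ===== LEMMAS AND PROOFS =====

-- reversed value of the d low digits of n in the given base
def pvRev (base : Int) : Nat → Int → Int
  | 0, _ => 0
  | d + 1, n => (PySem.Int.mod n base) * base ^ d + pvRev base d (PySem.Int.floordiv n base)

lemma pvFdiv (a b : Int) (h : 0 ≤ b) : PySem.Int.floordiv a b = a / b := by
  simp [PySem.Int.floordiv, Int.fdiv_eq_ediv, h]

lemma pvFmod (a b : Int) (h : 0 ≤ b) : PySem.Int.mod a b = a % b := by
  simp [PySem.Int.mod, Int.fmod_eq_emod, h]

lemma nextPowB_eq_A : ∀ (fuel : Nat) (i k n : Int), pvNextPowB fuel i k n = pvNextPowA fuel i k n := by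
  intro fuel
  induction fuel with
  | zero => intro i k n; rfl
  | succ f ih => intro i k n; simp [pvNextPowA, pvNextPowB, ih]

lemma selfLtPow (b : Int) (hb : 2 ≤ b) (d : Nat) : (d : Int) < b ^ d := by
  have h1 : (d : Int) < 2 ^ d := by
    exact_mod_cast Nat.lt_two_pow_self
  have h2 : (2 : Int) ^ d ≤ b ^ d := pow_le_pow_left₀ (by norm_num) hb d
  omega

lemma nextPow_spec (base : Int) (hb : 2 ≤ base) (i : Int) :
    ∀ (fuel e : Nat), i < base ^ (e + fuel) →
      ∃ d : Nat, pvNextPowA fuel i base (base ^ e) = base ^ d ∧ i < base ^ d := by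
  intro fuel
  induction fuel with
  | zero => intro e h; exact ⟨e, rfl, by simpa using h⟩
  | succ f ih =>
    intro e h
    by_cases hle : (base : Int) ^ e ≤ i
    · have h' : i < base ^ (e + 1 + f) := by
        have he : e + 1 + f = e + (f + 1) := by omega
        rw [he]; exact h
      obtain ⟨d, hd, hlt⟩ := ih (e + 1) h'
      refine ⟨d, ?_, hlt⟩
      simp only [pvNextPowA, if_pos hle]
      rw [show base ^ e * base = base ^ (e + 1) by ring]
      exact hd
    · exact ⟨e, by simp [pvNextPowA, hle], by omega⟩

lemma nextPow_fuel (maximum base : Int) (hb : 2 ≤ base) :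
    maximum - 1 < base ^ (0 + ((maximum - 1).toNat + 1)) := by
  have h1 : ((maximum - 1).toNat : Int) < base ^ ((maximum - 1).toNat) := selfLtPow base hb _
  have h2 : base ^ ((maximum - 1).toNat) ≤ base ^ (0 + ((maximum - 1).toNat + 1)) := by
    apply pow_le_pow_right₀ (by omega)
    omega
  have h3 : maximum - 1 ≤ ((maximum - 1).toNat : Int) := Int.self_le_toNat _
  omega

lemma fdiv_pow_succ (base : Int) (hb : 2 ≤ base) (e : Nat) :
    PySem.Int.floordiv (base ^ (e + 1)) base = base ^ e := by
  rw [pvFdiv _ _ (by omega), pow_succ]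
  exact Int.mul_ediv_cancel _ (by omega)

lemma fdiv_one_lt (base : Int) (hb : 2 ≤ base) : PySem.Int.floordiv 1 base = 0 := by
  rw [pvFdiv _ _ (by omega)]
  exact Int.ediv_eq_zero_of_lt (by omega) (by omega)

lemma innerA_zero (base it j n : Int) : ∀ fuel, pvInnerA fuel base it j n 0 = j := by
  intro fuel; cases fuel <;> simp [pvInnerA]

lemma innerA_pow (base : Int) (hb : 2 ≤ base) :
    ∀ (d : Nat) (fuel : Nat), d < fuel → ∀ (j n : Int),
      pvInnerA fuel base base j n (base ^ d) = j + pvRev base (d + 1) n := by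
  intro d
  induction d with
  | zero =>
    intro fuel hf j n
    obtain ⟨f, rfl⟩ : ∃ f, fuel = f + 1 := ⟨fuel - 1, by omega⟩
    simp only [pvInnerA, pow_zero, if_pos (by norm_num : (1:Int) > 0), fdiv_one_lt base hb,
      innerA_zero]
    simp [pvRev]
  | succ d ih =>
    intro fuel hf j n
    obtain ⟨f, rfl⟩ : ∃ f, fuel = f + 1 := ⟨fuel - 1, by omega⟩
    have hpos : (0 : Int) < base ^ (d + 1) := pow_pos (by omega) _
    simp only [pvInnerA, if_pos hpos, fdiv_pow_succ base hb d]
    rw [ih f (by omega)]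
    simp [pvRev, pow_succ]
    ring

-- splitting off the most significant digit: rev_{k+1}(t*base^k + s) = base*rev_k(s) + t
lemma revSplit (base : Int) (hb : 2 ≤ base) :
    ∀ (k : Nat) (s t : Int), 0 ≤ s → s < base ^ k → 0 ≤ t → t < base →
      pvRev base (k + 1) (t * base ^ k + s) = base * pvRev base k s + t := by
  intro k
  induction k with
  | zero =>
    intro s t hs0 hs1 ht0 ht1
    have hs : s = 0 := by rw [pow_zero] at hs1; omega
    subst hs
    have hm : PySem.Int.mod t base = t := by
      rw [pvFmod _ _ (by omega)]
      exact Int.emod_eq_of_lt ht0 ht1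
    simp only [pvRev, pow_zero, mul_one, mul_zero, add_zero, zero_add]
    exact hm
  | succ k ih =>
    intro s t hs0 hs1 ht0 ht1
    have hbpos : (0 : Int) < base := by omega
    have hmod : PySem.Int.mod (t * base ^ (k + 1) + s) base = PySem.Int.mod s base := by
      rw [pvFmod _ _ (by omega), pvFmod _ _ (by omega)]
      conv_lhs => rw [show t * base ^ (k + 1) + s = s + base * (t * base ^ k) by ring]
      exact Int.add_mul_emod_self_left s base (t * base ^ k)
    have hdivX : PySem.Int.floordiv (t * base ^ (k + 1) + s) base
        = t * base ^ k + PySem.Int.floordiv s base := by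
      rw [pvFdiv _ _ (by omega), pvFdiv _ _ (by omega)]
      conv_lhs => rw [show t * base ^ (k + 1) + s = s + (t * base ^ k) * base by ring]
      rw [Int.add_mul_ediv_right _ _ (by omega : base ≠ 0)]
      ring
    have hsdiv0 : 0 ≤ PySem.Int.floordiv s base := by
      rw [pvFdiv _ _ (by omega)]
      exact Int.ediv_nonneg hs0 (by omega)
    have hsdiv1 : PySem.Int.floordiv s base < base ^ k := by
      rw [pvFdiv _ _ (by omega)]
      rw [Int.ediv_lt_iff_lt_mul hbpos]
      calc s < base ^ (k + 1) := hs1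
        _ = base ^ k * base := by ring
    show (PySem.Int.mod (t * base ^ (k + 1) + s) base) * base ^ (k + 1)
        + pvRev base (k + 1) (PySem.Int.floordiv (t * base ^ (k + 1) + s) base)
        = base * pvRev base (k + 1) s + t
    rw [hmod, hdivX, ih (PySem.Int.floordiv s base) t hsdiv0 hsdiv1 ht0 ht1]
    show PySem.Int.mod s base * base ^ (k + 1)
        + (base * pvRev base k (PySem.Int.floordiv s base) + t)
        = base * ((PySem.Int.mod s base) * base ^ k + pvRev base k (PySem.Int.floordiv s base)) + t
    ring

-- the reversed-digit sequence for indices 0 .. base^d - 1, as a List Int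
def pvL (base : Int) (d : Nat) : List Int :=
  (List.range (base.toNat ^ d)).map (fun (s : Nat) => pvRev base d ((s : Nat) : Int))

-- block decomposition of List.range (k * m)
lemma range_mul_flatMap : ∀ (k m : Nat),
    List.range (k * m) = (List.range k).flatMap (fun t => (List.range m).map (fun s => t * m + s)) := by
  intro k
  induction k with
  | zero => intro m; simp
  | succ k ih =>
    intro m
    rw [Nat.succ_mul, List.range_add, ih, List.range_succ]
    simp

lemma level_step (base : Int) (hb : 2 ≤ base) (d : Nat) :
    pvL base (d + 1)
    = (List.range base.toNat).flatMap
        (fun (t : Nat) => (pvL base d).map (fun x => base * x + ((t : Nat) : Int))) := by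
  have hbt : ((base.toNat : Nat) : Int) = base := Int.toNat_of_nonneg (by omega)
  have hpow : ∀ e : Nat, ((base.toNat ^ e : Nat) : Int) = base ^ e := by
    intro e; push_cast [hbt]; ring
  unfold pvL
  rw [pow_succ, mul_comm (base.toNat ^ d) base.toNat, range_mul_flatMap, List.map_flatMap]
  rw [List.flatMap_def, List.flatMap_def]
  congr 1
  apply List.map_congr_left
  intro t ht
  rw [List.map_map, List.map_map]
  apply List.map_congr_left
  intro s hs
  simp only [Function.comp]
  have hs' : ((s : Nat) : Int) < base ^ d := by
    rw [← hpow d]; exact_mod_cast List.mem_range.mp hs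
  have ht' : ((t : Nat) : Int) < base := by
    rw [← hbt]; exact_mod_cast List.mem_range.mp ht
  have hcast : (((t * base.toNat ^ d + s : Nat)) : Int)
      = (t : Int) * base ^ d + (s : Int) := by
    push_cast [hpow d]; ring
  rw [hcast]
  exact revSplit base hb d (s : Int) (t : Int) (by positivity) hs' (by positivity) ht'

lemma buildB_spec (base : Int) (hb : 2 ≤ base) :
    ∀ (c fuel k : Nat), c ≤ fuel →
      pvBuildB fuel base (base ^ (k + c)) (pvL base k) (base ^ k) = pvL base (k + c) := by
  have hbt : ((base.toNat : Nat) : Int) = base := Int.toNat_of_nonneg (by omega)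
  have hpr : PySem.List.pyRange 0 base 1 = (List.range base.toNat).map (fun (k : Nat) => (k : Int)) := by
    have h := PySem.List.pyRange_zero_natCast base.toNat
    rw [hbt] at h
    exact h
  intro c
  induction c with
  | zero =>
    intro fuel k _
    cases fuel with
    | zero => rfl
    | succ f => simp [pvBuildB]
  | succ c ih =>
    intro fuel k hcf
    obtain ⟨f, rfl⟩ : ∃ f, fuel = f + 1 := ⟨fuel - 1, by omega⟩
    have hlt : base ^ k < base ^ (k + (c + 1)) :=
      Int.pow_lt_pow_of_lt (by omega) (by omega)
    have hstep : (PySem.List.pyRange 0 base 1).flatMap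
        (fun t => (pvL base k).map (fun x => base * x + t)) = pvL base (k + 1) := by
      rw [hpr, List.flatMap_map]
      exact (level_step base hb k).symm
    simp only [pvBuildB, if_pos hlt, hstep]
    rw [show base ^ k * base = base ^ (k + 1) by ring]
    rw [show k + (c + 1) = (k + 1) + c by omega]
    exact ih f (k + 1) (by omega)

-- A's per-index digit loop computes pvRev base d
lemma innerA_rev (base : Int) (hb : 2 ≤ base) (d : Nat) (fuel : Nat) (hf : d ≤ fuel) (i : Int) :
    pvInnerA fuel base base 0 i (PySem.Int.floordiv (base ^ d) base) = pvRev base d i := by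
  cases d with
  | zero =>
    rw [pow_zero, fdiv_one_lt base hb, innerA_zero]
    rfl
  | succ e =>
    rw [fdiv_pow_succ base hb e, innerA_pow base hb e fuel (by omega)]
    ring_nf

lemma map_rev_pyRange (base : Int) (hb : 2 ≤ base) (d : Nat) :
    (PySem.List.pyRange 0 (base ^ d) 1).map (fun i => pvRev base d i) = pvL base d := by
  have hbt : ((base.toNat : Nat) : Int) = base := Int.toNat_of_nonneg (by omega)
  have hpow : ((base.toNat ^ d : Nat) : Int) = base ^ d := by push_cast [hbt]; ring
  rw [← hpow, PySem.List.pyRange_zero_natCast, List.map_map]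
  rfl

lemma fdiv_one_nonpos (base : Int) (hb : base ≤ -1) : PySem.Int.floordiv 1 base ≤ 0 := by
  have h1 : (0 : Int) ≤ 1 / (-base) := Int.ediv_nonneg (by omega) (by omega)
  have h2 : (1 : Int) / base = -(1 / (-base)) := by
    rw [← Int.ediv_neg, neg_neg]
  have hf : Int.fdiv 1 base = 1 / base - if 0 ≤ base ∨ base ∣ 1 then 0 else 1 :=
    Int.fdiv_eq_ediv
  have hd : PySem.Int.floordiv 1 base = Int.fdiv 1 base := rfl
  rw [hd, hf]
  split_ifs <;> omega

lemma innerA_nonpos (base it j n r : Int) (hr : r ≤ 0) : ∀ fuel, pvInnerA fuel base it j n r = j := by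
  intro fuel; cases fuel <;> simp [pvInnerA]; omega

-- ===== VERDICT (by name: the statement is the Claim_ definition above) =====
theorem digit_reversed_range_spec : Claim_equal_digit_reversed_range := by
  intro maximum base _ hpre
  rcases hpre with hb | ⟨hbneg, hmax⟩
  case inr =>
    -- degenerate region: maximum ≤ 1, base ≤ -1; both programs return [0] or []
    have ht : (maximum - 1).toNat = 0 := by omega
    simp only [Spec_digit_reversed_range, digit_reversed_range, digit_reversed_range_alt, ht]
    rw [nextPowB_eq_A]
    have hnp : pvNextPowA (0 + 1) (maximum - 1) base 1 = 1 := by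
      simp [pvNextPowA, show ¬(1 ≤ maximum - 1) by omega]
    rw [hnp]
    have hpr1 : PySem.List.pyRange 0 1 1 = [0] := by decide
    rw [hpr1]
    have hbuild1 : pvBuildB ((1 : Int).toNat + 1) base 1 [0] 1 = [0] := by
      simp [pvBuildB]
    rw [hbuild1]
    simp only [List.foldl_cons, List.foldl_nil,
      innerA_nonpos base base 0 0 _ (fdiv_one_nonpos base hbneg)]
    by_cases h0 : (0 : Int) < maximum
    · simp [h0, List.filter]
    · simp [h0, List.filter]
  case inl =>
    simp only [Spec_digit_reversed_range, digit_reversed_range, digit_reversed_range_alt]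
    rw [nextPowB_eq_A]
    obtain ⟨d, hN, _⟩ := nextPow_spec base hb (maximum - 1) ((maximum - 1).toNat + 1) 0
      (nextPow_fuel maximum base hb)
    rw [pow_zero] at hN
    rw [hN]
    have hdN : d ≤ (base ^ d).toNat + 1 := by
      have h1 : (d : Int) < base ^ d := selfLtPow base hb d
      omega
    have hrev : ∀ i : Int, pvInnerA ((base ^ d).toNat + 1) base base 0 i
        (PySem.Int.floordiv (base ^ d) base) = pvRev base d i :=
      fun i => innerA_rev base hb d ((base ^ d).toNat + 1) hdN i
    -- A side: fold = map over filter
    have hfold := PySem.List.foldl_append_if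
      (fun i => decide (pvInnerA ((base ^ d).toNat + 1) base base 0 i
          (PySem.Int.floordiv (base ^ d) base) < maximum))
      (fun i => pvInnerA ((base ^ d).toNat + 1) base base 0 i
          (PySem.Int.floordiv (base ^ d) base))
      (PySem.List.pyRange 0 (base ^ d) 1) []
    simp only [decide_eq_true_eq] at hfold
    rw [hfold, List.nil_append]
    -- B side: build = map, then commute the filter with the map
    have hBL : pvBuildB ((base ^ d).toNat + 1) base (base ^ d) [0] 1
        = (PySem.List.pyRange 0 (base ^ d) 1).map (fun i => pvRev base d i) := by
      rw [map_rev_pyRange base hb d]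
      have h0 : pvL base 0 = [0] := by simp [pvL, pvRev]
      have h := buildB_spec base hb d ((base ^ d).toNat + 1) 0 (by omega)
      rw [zero_add] at h
      rw [← h0, ← h, pow_zero]
    rw [hBL, List.filter_map]
    rw [List.map_congr_left (fun i _ => hrev i),
      List.filter_congr (fun i _ => by rw [hrev i])]
    rfl
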